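-- pv_equiv track=rewrite | github.com/graytower/INT_Overlay | DFSPathPlan/DFSPathPlan_sl_class.py | TopomapMaker_leaf
-- ===== SOURCE A (Python) =====
-- def TopomapMaker_leaf(spine):
--     sNum = spine * 3
--     Matrix_leaf = [[0] * sNum for n in range(sNum)]
--     for i in range(spine * 2):
--         for j in range(spine * 2, sNum):
--             Matrix_leaf[i][j] = 1
--             Matrix_leaf[j][i] = 1
--     return Matrix_leaf
-- ===== SOURCE B (Python) =====
-- def TopomapMaker_leaf(spine):
--     sNum = spine * 3
--     return [
--         [0] * (2 * spine) + [1] * spine if i < 2 * spine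
--         else [1] * (2 * spine) + [0] * spine
--         for i in range(sNum)
--     ]
-- ===== Notes on version B (the rewrite author's own statement) =====
-- stated objective: idiomatic
-- what changed: B builds the matrix row by row with a single comprehension exploiting the complete-bipartite block structure (first 2*spine nodes vs last spine), emitting each row as a concatenation of constant blocks, instead of zero-initializing an sNum x sNum matrix and then filling the block symmetrically with a nested double loop of paired cell writes.
import Mathlib
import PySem

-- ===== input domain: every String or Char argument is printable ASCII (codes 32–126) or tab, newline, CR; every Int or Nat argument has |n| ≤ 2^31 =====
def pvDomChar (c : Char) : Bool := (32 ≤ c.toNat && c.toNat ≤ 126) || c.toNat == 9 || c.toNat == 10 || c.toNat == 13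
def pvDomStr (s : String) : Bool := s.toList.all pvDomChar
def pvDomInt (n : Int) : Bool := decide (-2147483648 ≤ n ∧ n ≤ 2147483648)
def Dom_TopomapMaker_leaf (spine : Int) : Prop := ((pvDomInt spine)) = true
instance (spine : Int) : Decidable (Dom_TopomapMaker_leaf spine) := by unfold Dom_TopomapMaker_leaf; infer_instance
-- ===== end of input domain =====

-- B builds each row directly as a concatenation of constant blocks (idiomatic comprehension)
-- instead of A's zero-init plus symmetric double-loop fill; same result, same cost.

-- ===== PORT A =====
-- Matrix[i][j] = v for the loop's indices, which are always ≥ 0 and in range,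
-- so .toNat list update is exact here.
def pySetCell (m : List (List Int)) (i j : Int) (v : Int) : List (List Int) :=
  m.modify i.toNat (fun row => row.set j.toNat v)

-- sNum = spine * 3 and matrix0 are inlined (Lean `let` blocks rewriting in proofs)
def TopomapMaker_leaf (spine : Int) : List (List Int) :=
  (PySem.List.pyRange 0 (spine * 2) 1).foldl
    (fun m i =>
      (PySem.List.pyRange (spine * 2) (spine * 3) 1).foldl
        (fun m j => pySetCell (pySetCell m i j 1) j i 1) m)
    ((PySem.List.pyRange 0 (spine * 3) 1).map (fun _ => PySem.List.pyRepeat [(0 : Int)] (spine * 3)))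

-- ===== PORT B =====
def TopomapMaker_leaf_alt (spine : Int) : List (List Int) :=
  (PySem.List.pyRange 0 (spine * 3) 1).map (fun i =>
    if i < 2 * spine then
      PySem.List.pyRepeat [(0 : Int)] (2 * spine) ++ PySem.List.pyRepeat [(1 : Int)] spine
    else
      PySem.List.pyRepeat [(1 : Int)] (2 * spine) ++ PySem.List.pyRepeat [(0 : Int)] spine)

-- ===== PRECONDITION & SPEC =====
def Spec_TopomapMaker_leaf (spine : Int) (out : List (List Int)) : Prop := out = TopomapMaker_leaf_alt spine
instance (spine : Int) (out : List (List Int)) : Decidable (Spec_TopomapMaker_leaf spine out) := by unfold Spec_TopomapMaker_leaf; infer_instance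

-- ===== CLAIM (what is proved, stated in full; the proofs are below) =====
def Claim_equal_TopomapMaker_leaf : Prop := ∀ (spine : Int), Dom_TopomapMaker_leaf spine → Spec_TopomapMaker_leaf spine (TopomapMaker_leaf spine)

-- ===== LEMMAS AND PROOFS =====

/-- An n×n matrix given by an index function. -/
def pvMk (n : Nat) (f : Nat → Nat → Int) : List (List Int) :=
  (List.range n).map (fun k => (List.range n).map (f k))

theorem pvMk_congr {n : Nat} {f g : Nat → Nat → Int}
    (h : ∀ k l, k < n → l < n → f k l = g k l) : pvMk n f = pvMk n g := by
  unfold pvMk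
  refine List.map_congr_left (fun k hk => ?_)
  refine List.map_congr_left (fun l hl => ?_)
  exact h k l (List.mem_range.mp hk) (List.mem_range.mp hl)

theorem pvSet_map_range {n j : Nat} (hj : j < n) (g : Nat → Int) (v : Int) :
    ((List.range n).map g).set j v = (List.range n).map (fun l => if l = j then v else g l) := by
  apply List.ext_getElem?
  intro l
  simp only [List.getElem?_set, List.getElem?_map, List.getElem?_range', List.length_map,
    List.length_range]
  by_cases h : j = l
  · subst h; simp [hj]
  · simp only [h, if_false]
    by_cases hl : l < n
    · simp [List.getElem?_range, hl, Ne.symm h]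
    · simp [List.getElem?_range, hl]

theorem pvModify_map_range {n i : Nat} (hi : i < n) (g : Nat → List Int) (h : List Int → List Int) :
    ((List.range n).map g).modify i h = (List.range n).map (fun k => if k = i then h (g i) else g k) := by
  apply List.ext_getElem?
  intro k
  simp only [List.getElem?_modify, List.getElem?_map]
  by_cases hk : k < n
  · simp only [List.getElem?_range, hk, Option.map_some]
    by_cases h' : i = k
    · subst h'; simp
    · simp [h', Ne.symm h']
  · simp [List.getElem?_range, hk]

theorem pvSetCell_pvMk {n : Nat} (f : Nat → Nat → Int) {i j : Nat} (hi : i < n) (hj : j < n)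
    (v : Int) :
    pySetCell (pvMk n f) (i : Int) (j : Int) v
      = pvMk n (fun k l => if k = i ∧ l = j then v else f k l) := by
  unfold pySetCell pvMk
  simp only [Int.toNat_natCast]
  rw [pvModify_map_range hi, pvSet_map_range hj]
  refine List.map_congr_left (fun k hk => ?_)
  by_cases h' : k = i
  · subst h'
    rw [if_pos rfl]
    refine List.map_congr_left (fun l hl => ?_)
    by_cases h'' : l = j <;> simp [h'']
  · rw [if_neg h']
    refine List.map_congr_left (fun l hl => ?_)
    simp [h']

-- the inner j-loop for a fixed row i, first t steps
theorem pvInner (s i : Nat) (hi : i < 2 * s) :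
    ∀ (t : Nat), t ≤ s → ∀ (f : Nat → Nat → Int),
      (List.range t).foldl
          (fun m (k : Nat) => pySetCell (pySetCell m (i : Int) ((2 * s + k : Nat) : Int) 1)
            ((2 * s + k : Nat) : Int) (i : Int) 1)
          (pvMk (3 * s) f)
        = pvMk (3 * s) (fun k l =>
            if k = i ∧ 2 * s ≤ l ∧ l < 2 * s + t then 1
            else if l = i ∧ 2 * s ≤ k ∧ k < 2 * s + t then 1
            else f k l) := by
  intro t
  induction t with
  | zero =>
    intro _ f
    simp only [List.range_zero, List.foldl_nil]
    refine (pvMk_congr (fun k l _ _ => ?_)).symm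
    split_ifs with h1 h2 <;> omega
  | succ t ih =>
    intro ht f
    rw [List.range_succ, List.foldl_append, List.foldl_cons, List.foldl_nil,
      ih (by omega) f,
      pvSetCell_pvMk _ (by omega) (by omega),
      pvSetCell_pvMk _ (by omega) (by omega)]
    refine pvMk_congr (fun k l hk hl => ?_)
    split_ifs <;> omega

-- the outer i-loop, first t rows
theorem pvOuter (s : Nat) :
    ∀ (t : Nat), t ≤ 2 * s → ∀ (f : Nat → Nat → Int),
      (List.range t).foldl
          (fun m (i : Nat) =>
            (List.range s).foldl
              (fun m (k : Nat) => pySetCell (pySetCell m (i : Int) ((2 * s + k : Nat) : Int) 1)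
                ((2 * s + k : Nat) : Int) (i : Int) 1) m)
          (pvMk (3 * s) f)
        = pvMk (3 * s) (fun k l =>
            if k < t ∧ 2 * s ≤ l then 1
            else if l < t ∧ 2 * s ≤ k then 1
            else f k l) := by
  intro t
  induction t with
  | zero =>
    intro _ f
    simp only [List.range_zero, List.foldl_nil]
    refine (pvMk_congr (fun k l _ _ => ?_)).symm
    split_ifs with h1 h2 <;> omega
  | succ t ih =>
    intro ht f
    rw [List.range_succ, List.foldl_append, List.foldl_cons, List.foldl_nil,
      ih (by omega) f, pvInner s t (by omega) s le_rfl]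
    refine pvMk_congr (fun k l hk hl => ?_)
    split_ifs <;> omega

-- the common closed form of both ports for nonnegative spine
def pvF (s : Nat) (k l : Nat) : Int :=
  if k < 2 * s ∧ 2 * s ≤ l then 1 else if l < 2 * s ∧ 2 * s ≤ k then 1 else 0

theorem pvRow_block (s : Nat) (c₀ c₁ : Int) :
    (List.range (3 * s)).map (fun l => if l < 2 * s then c₀ else c₁)
      = List.replicate (2 * s) c₀ ++ List.replicate s c₁ := by
  have h3 : 3 * s = 2 * s + s := by omega
  rw [h3, List.range_add, List.map_append, List.map_map]
  congr 1
  · rw [show (fun l => if l < 2 * s then c₀ else c₁) = fun l : Nat => if l < 2 * s then c₀ else c₁ from rfl]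
    calc (List.range (2*s)).map (fun l => if l < 2 * s then c₀ else c₁)
        = (List.range (2*s)).map (fun _ => c₀) := by
          refine List.map_congr_left (fun l hl => ?_)
          simp [List.mem_range.mp hl]
      _ = List.replicate (2*s) c₀ := by simp [List.map_const']
  · calc (List.range s).map ((fun l => if l < 2 * s then c₀ else c₁) ∘ (fun i => 2 * s + i))
        = (List.range s).map (fun _ => c₁) := by
          refine List.map_congr_left (fun l hl => ?_)
          simp
      _ = List.replicate s c₁ := by simp [List.map_const']

theorem pvA_eq (s : Nat) : TopomapMaker_leaf (s : Int) = pvMk (3 * s) (pvF s) := by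
  unfold TopomapMaker_leaf
  have hm0 : (PySem.List.pyRange 0 ((s : Int) * 3) 1).map
      (fun _ => PySem.List.pyRepeat [(0 : Int)] ((s : Int) * 3)) = pvMk (3 * s) (fun _ _ => 0) := by
    have h3 : (s : Int) * 3 = ((3 * s : Nat) : Int) := by push_cast; ring
    rw [h3, PySem.List.pyRange_zero_natCast, PySem.List.pyRepeat_singleton, List.map_map]
    unfold pvMk
    refine List.map_congr_left (fun k hk => ?_)
    simp only [Function.comp_apply, List.map_const', List.length_range, Int.toNat_natCast]
  have hout : PySem.List.pyRange 0 ((s : Int) * 2) 1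
      = (List.range (2 * s)).map (fun (k : Nat) => (k : Int)) := by
    have h2 : (s : Int) * 2 = ((2 * s : Nat) : Int) := by push_cast; ring
    rw [h2, PySem.List.pyRange_zero_natCast]
  have hin : PySem.List.pyRange ((s : Int) * 2) ((s : Int) * 3) 1
      = (List.range s).map (fun (k : Nat) => ((2 * s + k : Nat) : Int)) := by
    rw [PySem.List.pyRange_one]
    have : ((s : Int) * 3 - (s : Int) * 2).toNat = s := by omega
    rw [this]
    refine List.map_congr_left (fun k hk => ?_)
    push_cast; ring
  simp only [hm0, hout, hin, List.foldl_map]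
  rw [pvOuter s (2 * s) le_rfl]
  refine pvMk_congr (fun k l hk hl => ?_)
  unfold pvF
  split_ifs <;> rfl

theorem pvB_eq (s : Nat) : TopomapMaker_leaf_alt (s : Int) = pvMk (3 * s) (pvF s) := by
  unfold TopomapMaker_leaf_alt
  have h3 : (s : Int) * 3 = ((3 * s : Nat) : Int) := by push_cast; ring
  rw [h3, PySem.List.pyRange_zero_natCast, List.map_map]
  unfold pvMk
  refine List.map_congr_left (fun k hk => ?_)
  have hk' := List.mem_range.mp hk
  simp only [Function.comp, PySem.List.pyRepeat_singleton]
  have h2 : (2 * (s : Int)).toNat = 2 * s := by omega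
  have hs : (s : Int).toNat = s := Int.toNat_natCast s
  by_cases hcase : k < 2 * s
  · rw [if_pos (by exact_mod_cast hcase), h2, hs, ← pvRow_block s 0 1]
    refine List.map_congr_left (fun l hl => ?_)
    have hl' := List.mem_range.mp hl
    unfold pvF
    split_ifs <;> first | rfl | omega
  · rw [if_neg (by exact_mod_cast hcase), h2, hs, ← pvRow_block s 1 0]
    refine List.map_congr_left (fun l hl => ?_)
    have hl' := List.mem_range.mp hl
    unfold pvF
    split_ifs <;> first | rfl | omega

theorem pvNeg (spine : Int) (h : spine < 0) :
    TopomapMaker_leaf spine = [] ∧ TopomapMaker_leaf_alt spine = [] := by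
  constructor
  · unfold TopomapMaker_leaf
    rw [PySem.List.pyRange_one_eq_nil (by omega), PySem.List.pyRange_one_eq_nil (by omega)]
    simp
  · unfold TopomapMaker_leaf_alt
    rw [PySem.List.pyRange_one_eq_nil (by omega)]
    simp

-- ===== VERDICT (by name: the statement is the Claim_ definition above) =====
theorem TopomapMaker_leaf_spec : Claim_equal_TopomapMaker_leaf := by
  intro spine _
  unfold Spec_TopomapMaker_leaf
  by_cases h : 0 ≤ spine
  · obtain ⟨s, rfl⟩ := Int.eq_ofNat_of_zero_le h
    rw [pvA_eq, pvB_eq]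
  · obtain ⟨hA, hB⟩ := pvNeg spine (by omega)
    rw [hA, hB]
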